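-- pv_equiv track=rewrite | github.com/alchemiststudiosDOTai/alchemy-rs | scripts/dependency_map.py | parse_use_tree
-- ===== SOURCE A (Python) =====
-- def parse_use_tree(tokens: list[str], prefix: list[str] | None = None, index: int = 0):
--     if prefix is None:
--         prefix = []
--     results: list[list[str]] = []
--     path: list[str] = []
--     idx = index
--     while idx < len(tokens):
--         token = tokens[idx]
--         if token == ",":
--             if path:
--                 results.append(prefix + path)
--                 path = []
--             idx += 1
--             continue
--         if token == "}":
--             if path:
--                 results.append(prefix + path)
--             return results, idx + 1
--         if token == "{":
--             nested_results, idx = parse_use_tree(tokens, prefix + path, idx + 1)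
--             results.extend(nested_results)
--             path = []
--             continue
--         if token == "::":
--             idx += 1
--             continue
--         path.append(token)
--         idx += 1
--     if path:
--         results.append(prefix + path)
--     return results, idx
-- ===== SOURCE B (Python) =====
-- def parse_use_tree(tokens: list[str], prefix: list[str] | None = None, index: int = 0):
--     results: list[list[str]] = []
--     stack: list[tuple[list[str], list[str]]] = [(list(prefix or []), [])]
--     idx = index
--     n = len(tokens)
--     while idx < n:
--         token = tokens[idx]
--         if token == "{":
--             pfx, path = stack[-1]
--             stack[-1] = (pfx, [])
--             stack.append((pfx + path, []))
--         elif token == "}":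
--             pfx, path = stack.pop()
--             if path:
--                 results.append(pfx + path)
--             if not stack:
--                 return results, idx + 1
--         elif token == ",":
--             pfx, path = stack[-1]
--             if path:
--                 results.append(pfx + path)
--                 stack[-1] = (pfx, [])
--         elif token != "::":
--             stack[-1][1].append(token)
--         idx += 1
--     for pfx, path in reversed(stack):
--         if path:
--             results.append(pfx + path)
--     return results, idx
-- ===== Notes on version B (the rewrite author's own statement) =====
-- stated objective: alternative
-- what changed: Replaces A's recursive descent (one recursive call per '{', with nested results spliced in on return) by a single left-to-right scan driven by an explicit stack of (prefix, path) frames.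
import Mathlib
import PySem

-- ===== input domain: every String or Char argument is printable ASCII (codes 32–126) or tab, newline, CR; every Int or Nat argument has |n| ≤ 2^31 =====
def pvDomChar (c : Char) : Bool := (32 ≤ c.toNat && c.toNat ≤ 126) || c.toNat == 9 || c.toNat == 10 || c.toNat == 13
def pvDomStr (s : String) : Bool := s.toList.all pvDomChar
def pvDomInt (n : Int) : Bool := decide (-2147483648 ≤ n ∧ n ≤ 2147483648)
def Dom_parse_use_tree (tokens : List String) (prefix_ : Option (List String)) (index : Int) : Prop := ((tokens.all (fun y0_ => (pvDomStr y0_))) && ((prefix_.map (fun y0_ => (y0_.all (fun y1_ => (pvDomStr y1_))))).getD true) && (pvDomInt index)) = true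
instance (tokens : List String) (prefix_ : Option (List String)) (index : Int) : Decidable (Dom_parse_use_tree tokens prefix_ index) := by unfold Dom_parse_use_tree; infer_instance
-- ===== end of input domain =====

-- B replaces A's recursive descent by an iterative scan with an explicit stack of (prefix, path)
-- frames (objective: alternative decomposition, same asymptotic cost).

-- ===== PORT A =====
-- Transliteration of A's while-loop + recursion; `fuel` is only a termination guard
-- (never exhausted on inputs satisfying Pre_, see pvLoopS_terminates below).
def pvLoopA (tokens : List String) (pfx : List String) (fuel : Nat)
    (results : List (List String)) (path : List String) (idx : Int) :
    List (List String) × Int :=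
  match fuel with
  | 0 => (results, idx)
  | fuel + 1 =>
    if idx < (tokens.length : Int) then
      match PySem.List.pyGet? tokens idx with
      | none => (results, idx)  -- Python: IndexError (excluded by Pre_)
      | some token =>
        if token = "," then
          if path = [] then pvLoopA tokens pfx fuel results path (idx + 1)
          else pvLoopA tokens pfx fuel (results ++ [pfx ++ path]) [] (idx + 1)
        else if token = "}" then
          (if path = [] then results else results ++ [pfx ++ path], idx + 1)
        else if token = "{" then
          let nested := pvLoopA tokens (pfx ++ path) fuel [] [] (idx + 1)
          pvLoopA tokens pfx fuel (results ++ nested.1) [] nested.2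
        else if token = "::" then pvLoopA tokens pfx fuel results path (idx + 1)
        else pvLoopA tokens pfx fuel results (path ++ [token]) (idx + 1)
    else (if path = [] then results else results ++ [pfx ++ path], idx)

def parse_use_tree (tokens : List String) (prefix_ : Option (List String)) (index : Int) :
    List (List String) × Int :=
  pvLoopA tokens (prefix_.getD []) (4 * tokens.length + 1) [] [] index

-- ===== PORT B =====
-- B's end-of-input flush: `for pfx, path in reversed(stack)` (stack top = list head here).
def pvFlushB (frames : List (List String × List String)) (results : List (List String)) :
    List (List String) :=
  frames.foldl (fun acc f => if f.2 = [] then acc else acc ++ [f.1 ++ f.2]) results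

-- B's while-loop: `top` is the top stack frame, `stk` the frames below it.
def pvLoopB (tokens : List String) (top : List String × List String)
    (stk : List (List String × List String)) (results : List (List String)) (idx : Int) :
    List (List String) × Int :=
  if _h : idx < (tokens.length : Int) then
    match PySem.List.pyGet? tokens idx with
    | none => (results, idx)  -- Python: IndexError (excluded by Pre_)
    | some token =>
      if token = "{" then
        pvLoopB tokens (top.1 ++ top.2, []) ((top.1, []) :: stk) results (idx + 1)
      else if token = "}" then
        let results' := if top.2 = [] then results else results ++ [top.1 ++ top.2]
        match stk with
        | [] => (results', idx + 1)
        | t :: r => pvLoopB tokens t r results' (idx + 1)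
      else if token = "," then
        if top.2 = [] then pvLoopB tokens top stk results (idx + 1)
        else pvLoopB tokens (top.1, []) stk (results ++ [top.1 ++ top.2]) (idx + 1)
      else if token = "::" then pvLoopB tokens top stk results (idx + 1)
      else pvLoopB tokens (top.1, top.2 ++ [token]) stk results (idx + 1)
  else (pvFlushB (top :: stk) results, idx)
termination_by ((tokens.length : Int) - idx).toNat
decreasing_by all_goals omega

def parse_use_tree_alt (tokens : List String) (prefix_ : Option (List String)) (index : Int) :
    List (List String) × Int :=
  pvLoopB tokens (prefix_.getD [], []) [] [] index

-- ===== PRECONDITION & SPEC =====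
-- A raises IndexError exactly when index < -len(tokens) (negative-index wraparound runs off
-- the front of the list); Pre_ admits every input on which A returns.
def Pre_parse_use_tree (tokens : List String) (prefix_ : Option (List String)) (index : Int) : Prop :=
  -(tokens.length : Int) ≤ index

instance (tokens : List String) (prefix_ : Option (List String)) (index : Int) :
    Decidable (Pre_parse_use_tree tokens prefix_ index) := by
  unfold Pre_parse_use_tree; infer_instance

def pvWitness_parse_use_tree : List String × Option (List String) × Int :=
  (["a", "{", "b", ",", "c", "}"], some ["p"], 0)

def Spec_parse_use_tree (tokens : List String) (prefix_ : Option (List String)) (index : Int)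
    (out : List (List String) × Int) : Prop := out = parse_use_tree_alt tokens prefix_ index

instance (tokens : List String) (prefix_ : Option (List String)) (index : Int)
    (out : List (List String) × Int) : Decidable (Spec_parse_use_tree tokens prefix_ index out) := by
  unfold Spec_parse_use_tree; infer_instance

-- ===== CLAIM =====
def Claim_equal_parse_use_tree : Prop := ∀ (tokens : List String) (prefix_ : Option (List String)) (index : Int), Dom_parse_use_tree tokens prefix_ index → Pre_parse_use_tree tokens prefix_ index → Spec_parse_use_tree tokens prefix_ index (parse_use_tree tokens prefix_ index)

-- ===== LEMMAS AND PROOFS =====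

-- Ghost version of A's loop: same recursion, but it reports fuel exhaustion / IndexError as
-- `none` and flags whether the scan ended by consuming '}' (true) or by running off the end.
def pvLoopS (tokens : List String) (pfx : List String) (fuel : Nat)
    (results : List (List String)) (path : List String) (idx : Int) :
    Option (List (List String) × Int × Bool) :=
  match fuel with
  | 0 => none
  | fuel + 1 =>
    if idx < (tokens.length : Int) then
      match PySem.List.pyGet? tokens idx with
      | none => none
      | some token =>
        if token = "," then
          if path = [] then pvLoopS tokens pfx fuel results path (idx + 1)
          else pvLoopS tokens pfx fuel (results ++ [pfx ++ path]) [] (idx + 1)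
        else if token = "}" then
          some (if path = [] then results else results ++ [pfx ++ path], idx + 1, true)
        else if token = "{" then
          match pvLoopS tokens (pfx ++ path) fuel [] [] (idx + 1) with
          | none => none
          | some (res1, i1, _) => pvLoopS tokens pfx fuel (results ++ res1) [] i1
        else if token = "::" then pvLoopS tokens pfx fuel results path (idx + 1)
        else pvLoopS tokens pfx fuel results (path ++ [token]) (idx + 1)
    else some (if path = [] then results else results ++ [pfx ++ path], idx, false)

theorem pvGet_some (tokens : List String) (idx : Int)
    (h1 : -(tokens.length : Int) ≤ idx) (h2 : idx < (tokens.length : Int)) :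
    ∃ t, PySem.List.pyGet? tokens idx = some t := by
  cases h : PySem.List.pyGet? tokens idx with
  | some t => exact ⟨t, rfl⟩
  | none =>
    exfalso
    rw [PySem.List.pyGet?_eq_none_iff] at h
    exact h (by constructor <;> omega)

theorem pvLoopS_acc (tokens : List String) (fuel : Nat) :
    ∀ (pfx path : List String) (results : List (List String)) (idx : Int),
    pvLoopS tokens pfx fuel results path idx =
      (pvLoopS tokens pfx fuel [] path idx).map (fun o => (results ++ o.1, o.2)) := by
  induction fuel with
  | zero => intros; simp [pvLoopS]
  | succ fuel ih =>
    intro pfx path results idx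
    simp only [pvLoopS]
    by_cases hlt : idx < (tokens.length : Int)
    · simp only [if_pos hlt]
      cases hg : PySem.List.pyGet? tokens idx with
      | none => simp
      | some token =>
        simp only []
        by_cases h1 : token = ","
        · simp only [if_pos h1]
          by_cases hp : path = []
          · simp only [if_pos hp]; exact ih pfx path results (idx + 1)
          · simp only [if_neg hp]
            rw [ih pfx [] (results ++ [pfx ++ path]) (idx + 1),
                ih pfx [] ([] ++ [pfx ++ path]) (idx + 1)]
            cases pvLoopS tokens pfx fuel [] [] (idx + 1) <;> simp
        · simp only [if_neg h1]
          by_cases h2 : token = "}"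
          · simp only [if_pos h2]
            by_cases hp : path = [] <;> simp [hp]
          · simp only [if_neg h2]
            by_cases h3 : token = "{"
            · simp only [if_pos h3]
              cases hN : pvLoopS tokens (pfx ++ path) fuel [] [] (idx + 1) with
              | none => simp
              | some o =>
                obtain ⟨res1, i1, c1⟩ := o
                simp only []
                rw [ih pfx [] (results ++ res1) i1, ih pfx [] ([] ++ res1) i1]
                cases pvLoopS tokens pfx fuel [] [] i1 <;> simp
            · simp only [if_neg h3]
              by_cases h4 : token = "::"
              · simp only [if_pos h4]; exact ih pfx path results (idx + 1)
              · simp only [if_neg h4]; exact ih pfx (path ++ [token]) results (idx + 1)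
    · simp only [if_neg hlt]
      by_cases hp : path = [] <;> simp [hp]

theorem pvLoopS_ge (tokens : List String) (fuel : Nat) :
    ∀ (pfx path : List String) (results : List (List String)) (idx : Int) res i c,
    pvLoopS tokens pfx fuel results path idx = some (res, i, c) → idx ≤ i := by
  induction fuel with
  | zero => intros pfx path results idx res i c h; simp [pvLoopS] at h
  | succ fuel ih =>
    intro pfx path results idx res i c h
    simp only [pvLoopS] at h
    by_cases hlt : idx < (tokens.length : Int)
    · simp only [if_pos hlt] at h
      cases hg : PySem.List.pyGet? tokens idx with
      | none => simp [hg] at h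
      | some token =>
        simp only [hg] at h
        by_cases h1 : token = ","
        · simp only [if_pos h1] at h
          by_cases hp : path = []
          · simp only [if_pos hp] at h
            have := ih pfx path results (idx + 1) res i c h; omega
          · simp only [if_neg hp] at h
            have := ih pfx [] (results ++ [pfx ++ path]) (idx + 1) res i c h; omega
        · simp only [if_neg h1] at h
          by_cases h2 : token = "}"
          · simp only [if_pos h2] at h
            simp only [Option.some.injEq, Prod.mk.injEq] at h
            obtain ⟨-, h2', -⟩ := h
            omega
          · simp only [if_neg h2] at h
            by_cases h3 : token = "{"
            · simp only [if_pos h3] at h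
              cases hN : pvLoopS tokens (pfx ++ path) fuel [] [] (idx + 1) with
              | none => simp [hN] at h
              | some o =>
                obtain ⟨res1, i1, c1⟩ := o
                simp only [hN] at h
                have hge1 := ih (pfx ++ path) [] [] (idx + 1) res1 i1 c1 hN
                have hge2 := ih pfx [] (results ++ res1) i1 res i c h
                omega
            · simp only [if_neg h3] at h
              by_cases h4 : token = "::"
              · simp only [if_pos h4] at h
                have := ih pfx path results (idx + 1) res i c h; omega
              · simp only [if_neg h4] at h
                have := ih pfx (path ++ [token]) results (idx + 1) res i c h; omega
    · simp only [if_neg hlt] at h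
      simp only [Option.some.injEq, Prod.mk.injEq] at h
      obtain ⟨-, h2', -⟩ := h
      omega

theorem pvLoopS_eof (tokens : List String) (fuel : Nat) :
    ∀ (pfx path : List String) (results : List (List String)) (idx : Int) res i,
    -(tokens.length : Int) ≤ idx →
    pvLoopS tokens pfx fuel results path idx = some (res, i, false) →
    (tokens.length : Int) ≤ i := by
  induction fuel with
  | zero => intro pfx path results idx res i _ h; simp [pvLoopS] at h
  | succ fuel ih =>
    intro pfx path results idx res i hge h
    simp only [pvLoopS] at h
    by_cases hlt : idx < (tokens.length : Int)
    · simp only [if_pos hlt] at h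
      cases hg : PySem.List.pyGet? tokens idx with
      | none => simp [hg] at h
      | some token =>
        simp only [hg] at h
        by_cases h1 : token = ","
        · simp only [if_pos h1] at h
          by_cases hp : path = []
          · simp only [if_pos hp] at h
            exact ih pfx path results (idx + 1) res i (by omega) h
          · simp only [if_neg hp] at h
            exact ih pfx [] (results ++ [pfx ++ path]) (idx + 1) res i (by omega) h
        · simp only [if_neg h1] at h
          by_cases h2 : token = "}"
          · simp only [if_pos h2, Option.some.injEq, Prod.mk.injEq] at h
            obtain ⟨-, -, h3⟩ := h
            exact Bool.noConfusion h3
          · simp only [if_neg h2] at h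
            by_cases h3 : token = "{"
            · simp only [if_pos h3] at h
              cases hN : pvLoopS tokens (pfx ++ path) fuel [] [] (idx + 1) with
              | none => simp [hN] at h
              | some o =>
                obtain ⟨res1, i1, c1⟩ := o
                simp only [hN] at h
                have hge1 := pvLoopS_ge tokens fuel (pfx ++ path) [] [] (idx + 1) res1 i1 c1 hN
                exact ih pfx [] (results ++ res1) i1 res i (by omega) h
            · simp only [if_neg h3] at h
              by_cases h4 : token = "::"
              · simp only [if_pos h4] at h
                exact ih pfx path results (idx + 1) res i (by omega) h
              · simp only [if_neg h4] at h
                exact ih pfx (path ++ [token]) results (idx + 1) res i (by omega) h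
    · simp only [if_neg hlt, Option.some.injEq, Prod.mk.injEq] at h
      obtain ⟨-, h2, -⟩ := h
      omega

theorem pvLoopS_terminates (tokens : List String) (fuel : Nat) :
    ∀ (pfx path : List String) (results : List (List String)) (idx : Int),
    -(tokens.length : Int) ≤ idx →
    2 * ((tokens.length : Int) - idx).toNat + 1 ≤ fuel →
    (pvLoopS tokens pfx fuel results path idx).isSome := by
  induction fuel with
  | zero => intro pfx path results idx _ hf; omega
  | succ fuel ih =>
    intro pfx path results idx hge hf
    simp only [pvLoopS]
    by_cases hlt : idx < (tokens.length : Int)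
    · simp only [if_pos hlt]
      obtain ⟨token, hg⟩ := pvGet_some tokens idx hge hlt
      simp only [hg]
      by_cases h1 : token = ","
      · simp only [if_pos h1]
        by_cases hp : path = []
        · simp only [if_pos hp]
          exact ih pfx path results (idx + 1) (by omega) (by omega)
        · simp only [if_neg hp]
          exact ih pfx [] (results ++ [pfx ++ path]) (idx + 1) (by omega) (by omega)
      · simp only [if_neg h1]
        by_cases h2 : token = "}"
        · simp only [if_pos h2]; rfl
        · simp only [if_neg h2]
          by_cases h3 : token = "{"
          · simp only [if_pos h3]
            have hN := ih (pfx ++ path) [] [] (idx + 1) (by omega) (by omega)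
            cases hNe : pvLoopS tokens (pfx ++ path) fuel [] [] (idx + 1) with
            | none => rw [hNe] at hN; simp only [Option.isSome_none] at hN; exact Bool.noConfusion hN
            | some o =>
              obtain ⟨res1, i1, c1⟩ := o
              have hge1 := pvLoopS_ge tokens fuel (pfx ++ path) [] [] (idx + 1) res1 i1 c1 hNe
              exact ih pfx [] (results ++ res1) i1 (by omega) (by omega)
          · simp only [if_neg h3]
            by_cases h4 : token = "::"
            · simp only [if_pos h4]
              exact ih pfx path results (idx + 1) (by omega) (by omega)
            · simp only [if_neg h4]
              exact ih pfx (path ++ [token]) results (idx + 1) (by omega) (by omega)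
    · simp only [if_neg hlt]; rfl

theorem pvLoopA_eq_S (tokens : List String) (fuel : Nat) :
    ∀ (pfx path : List String) (results : List (List String)) (idx : Int) res i c,
    pvLoopS tokens pfx fuel results path idx = some (res, i, c) →
    pvLoopA tokens pfx fuel results path idx = (res, i) := by
  induction fuel with
  | zero => intro pfx path results idx res i c h; simp [pvLoopS] at h
  | succ fuel ih =>
    intro pfx path results idx res i c h
    simp only [pvLoopS] at h
    simp only [pvLoopA]
    by_cases hlt : idx < (tokens.length : Int)
    · simp only [if_pos hlt] at h ⊢
      cases hg : PySem.List.pyGet? tokens idx with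
      | none => simp [hg] at h
      | some token =>
        simp only [hg] at h ⊢
        by_cases h1 : token = ","
        · simp only [if_pos h1] at h ⊢
          by_cases hp : path = []
          · simp only [if_pos hp] at h ⊢
            exact ih pfx path results (idx + 1) res i c h
          · simp only [if_neg hp] at h ⊢
            exact ih pfx [] (results ++ [pfx ++ path]) (idx + 1) res i c h
        · simp only [if_neg h1] at h ⊢
          by_cases h2 : token = "}"
          · simp only [if_pos h2, Option.some.injEq, Prod.mk.injEq] at h
            obtain ⟨ha, hb, -⟩ := h
            subst ha; subst hb; rw [if_pos h2]
          · simp only [if_neg h2] at h ⊢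
            by_cases h3 : token = "{"
            · simp only [if_pos h3] at h ⊢
              cases hN : pvLoopS tokens (pfx ++ path) fuel [] [] (idx + 1) with
              | none => simp [hN] at h
              | some o =>
                obtain ⟨res1, i1, c1⟩ := o
                simp only [hN] at h
                have hA1 := ih (pfx ++ path) [] [] (idx + 1) res1 i1 c1 hN
                simp only [hA1]
                exact ih pfx [] (results ++ res1) i1 res i c h
            · simp only [if_neg h3] at h ⊢
              by_cases h4 : token = "::"
              · simp only [if_pos h4] at h ⊢
                exact ih pfx path results (idx + 1) res i c h
              · simp only [if_neg h4] at h ⊢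
                exact ih pfx (path ++ [token]) results (idx + 1) res i c h
    · simp only [if_neg hlt, Option.some.injEq, Prod.mk.injEq] at h
      obtain ⟨ha, hb, -⟩ := h
      subst ha; subst hb
      rw [if_neg hlt]

theorem pvFlushB_nil (stk : List (List String × List String)) (results : List (List String))
    (h : ∀ p ∈ stk, p.2 = ([] : List String)) : pvFlushB stk results = results := by
  induction stk generalizing results with
  | nil => rfl
  | cons p r ih =>
    have hp : p.2 = [] := h p (by simp)
    simp only [pvFlushB, List.foldl_cons, hp]
    exact ih results (fun q hq => h q (by simp [hq]))

theorem pvLoopS_stop (tokens : List String) (fuel : Nat) (pfx path : List String)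
    (results : List (List String)) (idx : Int) (res : List (List String)) (i : Int) (c : Bool)
    (hlt : ¬ idx < (tokens.length : Int))
    (h : pvLoopS tokens pfx fuel results path idx = some (res, i, c)) :
    res = (if path = [] then results else results ++ [pfx ++ path]) ∧ i = idx ∧ c = false := by
  cases fuel with
  | zero => simp [pvLoopS] at h
  | succ fuel =>
    simp only [pvLoopS, if_neg hlt, Option.some.injEq, Prod.mk.injEq] at h
    obtain ⟨ha, hb, hc⟩ := h
    exact ⟨ha.symm, hb.symm, hc.symm⟩

theorem pvLoopB_eq_S (tokens : List String) (fuel : Nat) :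
    ∀ (pfx path : List String) (stk : List (List String × List String))
      (results res : List (List String)) (idx i : Int) (c : Bool),
    -(tokens.length : Int) ≤ idx →
    (∀ p ∈ stk, p.2 = ([] : List String)) →
    pvLoopS tokens pfx fuel [] path idx = some (res, i, c) →
    pvLoopB tokens (pfx, path) stk results idx =
      if c then
        (match stk with
         | [] => (results ++ res, i)
         | t :: r => pvLoopB tokens t r (results ++ res) i)
      else (results ++ res, i) := by
  induction fuel with
  | zero => intro pfx path stk results res idx i c _ _ h; simp [pvLoopS] at h
  | succ fuel ih =>
    intro pfx path stk results res idx i c hge hstk h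
    simp only [pvLoopS] at h
    rw [pvLoopB]
    by_cases hlt : idx < (tokens.length : Int)
    · simp only [if_pos hlt] at h
      rw [dif_pos hlt]
      obtain ⟨token, hg⟩ := pvGet_some tokens idx hge hlt
      simp only [hg] at h ⊢
      by_cases h1 : token = ","
      · simp only [if_pos h1] at h
        rw [if_neg (by simp [h1]), if_neg (by simp [h1]), if_pos h1]
        by_cases hp : path = []
        · simp only [if_pos hp] at h
          rw [if_pos hp]
          exact ih pfx path stk results res (idx + 1) i c (by omega) hstk h
        · simp only [if_neg hp, List.nil_append] at h
          rw [if_neg hp]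
          rw [pvLoopS_acc tokens fuel pfx [] [pfx ++ path] (idx + 1)] at h
          cases hX : pvLoopS tokens pfx fuel [] [] (idx + 1) with
          | none => rw [hX] at h; simp at h
          | some o =>
            obtain ⟨res0, i0, c0⟩ := o
            rw [hX] at h
            simp only [Option.map_some, Option.some.injEq, Prod.mk.injEq] at h
            obtain ⟨ha, hb, hc⟩ := h
            subst ha; subst hb; subst hc
            rw [ih pfx [] stk (results ++ [pfx ++ path]) res0 (idx + 1) i0 c0 (by omega) hstk hX]
            cases c0 <;> cases stk <;> simp [List.append_assoc]
      · simp only [if_neg h1] at h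
        by_cases h2 : token = "}"
        · simp only [if_pos h2, Option.some.injEq, Prod.mk.injEq] at h
          obtain ⟨ha, hb, hc⟩ := h
          subst ha; subst hb; subst hc
          rw [if_neg (by simp [h2]), if_pos h2]
          cases stk <;> by_cases hp : path = [] <;> simp [hp]
        · simp only [if_neg h2] at h
          by_cases h3 : token = "{"
          · simp only [if_pos h3] at h
            rw [if_pos h3]
            cases hN : pvLoopS tokens (pfx ++ path) fuel [] [] (idx + 1) with
            | none => rw [hN] at h; simp at h
            | some o =>
              obtain ⟨res1, i1, c1⟩ := o
              rw [hN] at h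
              simp only [List.nil_append] at h
              have hge1 : idx + 1 ≤ i1 :=
                pvLoopS_ge tokens fuel (pfx ++ path) [] [] (idx + 1) res1 i1 c1 hN
              rw [pvLoopS_acc tokens fuel pfx [] res1 i1] at h
              cases hX : pvLoopS tokens pfx fuel [] [] i1 with
              | none => rw [hX] at h; simp at h
              | some o2 =>
                obtain ⟨res2, i2, c2⟩ := o2
                rw [hX] at h
                simp only [Option.map_some, Option.some.injEq, Prod.mk.injEq] at h
                obtain ⟨ha, hb, hc⟩ := h
                subst ha; subst hb; subst hc
                have hstk' : ∀ p ∈ ((pfx, ([] : List String)) :: stk), p.2 = ([] : List String) := by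
                  intro p hp
                  rw [List.mem_cons] at hp
                  rcases hp with rfl | hp
                  · rfl
                  · exact hstk p hp
                have hB1 := ih (pfx ++ path) [] ((pfx, []) :: stk) results res1 (idx + 1) i1 c1
                  (by omega) hstk' hN
                rw [hB1]
                cases c1 with
                | true =>
                  simp only [if_true]
                  rw [ih pfx [] stk (results ++ res1) res2 i1 i2 c2 (by omega) hstk hX]
                  cases c2 <;> cases stk <;> simp [List.append_assoc]
                | false =>
                  simp only [Bool.false_eq_true, if_false]
                  have hi1 : (tokens.length : Int) ≤ i1 :=
                    pvLoopS_eof tokens fuel (pfx ++ path) [] [] (idx + 1) res1 i1 (by omega) hN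
                  obtain ⟨hr2, hi2, hc2⟩ :=
                    pvLoopS_stop tokens fuel pfx [] [] i1 res2 i2 c2 (by omega) hX
                  subst hi2; subst hc2
                  simp only [if_true] at hr2
                  subst hr2
                  simp
          · simp only [if_neg h3] at h
            rw [if_neg h3]
            by_cases h4 : token = "::"
            · simp only [if_pos h4] at h
              rw [if_neg (by simp [h4]), if_neg (by simp [h4]), if_pos h4]
              exact ih pfx path stk results res (idx + 1) i c (by omega) hstk h
            · simp only [if_neg h4] at h
              rw [if_neg h2, if_neg h1, if_neg h4]
              exact ih pfx (path ++ [token]) stk results res (idx + 1) i c (by omega) hstk h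
    · simp only [if_neg hlt, Option.some.injEq, Prod.mk.injEq] at h
      rw [dif_neg hlt]
      obtain ⟨ha, hb, hc⟩ := h
      subst ha; subst hb; subst hc
      simp only [Bool.false_eq_true, if_false]
      have hflush : pvFlushB ((pfx, path) :: stk) results =
          if path = [] then results else results ++ [pfx ++ path] := by
        simp only [pvFlushB, List.foldl_cons]
        exact pvFlushB_nil stk _ hstk
      rw [hflush]
      by_cases hp : path = [] <;> simp [hp]

-- ===== VERDICT =====
theorem parse_use_tree_spec : Claim_equal_parse_use_tree := by
  intro tokens prefix_ index _hdom hpre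
  unfold Spec_parse_use_tree parse_use_tree parse_use_tree_alt
  have hpre' : -(tokens.length : Int) ≤ index := hpre
  have hfuel : 2 * ((tokens.length : Int) - index).toNat + 1 ≤ 4 * tokens.length + 1 := by omega
  have hs := pvLoopS_terminates tokens (4 * tokens.length + 1) (prefix_.getD []) [] [] index hpre' hfuel
  obtain ⟨⟨res, i, c⟩, hsome⟩ := Option.isSome_iff_exists.mp hs
  rw [pvLoopA_eq_S tokens _ _ _ _ _ res i c hsome]
  rw [pvLoopB_eq_S tokens _ _ _ [] [] res index i c hpre' (by intro p hp; cases hp) hsome]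
  cases c <;> simp
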